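-- pv_equiv track=rewrite | github.com/DaxTech/Chess | GUI.py | select_helper
-- ===== SOURCE A (Python) =====
-- def select_helper(position: tuple):
--     """
--     Handles user choice whether to go against AI or another player.
--
--     Parameters
--     ----------
--     position: tuple
--         X, y mouse position when clicked.
--     """
--     against_player = [(j, i) for i in range(390, 390 + 71) for j in range(125, 125 + 371)]
--     against_ai = [(j, i) for i in range(480, 480 + 71) for j in range(175, 175 + 286)]
--     if position in against_player:
--         return 1
--     elif position in against_ai:
--         return -1
--     else:
--         return 0
-- ===== SOURCE B (Python) =====
-- def select_helper(position: tuple):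
--     """Direct bound checks instead of building and scanning coordinate lists."""
--     if len(position) != 2:
--         return 0
--     x, y = position
--     if 125 <= x < 496 and 390 <= y < 461:
--         return 1
--     if 175 <= x < 461 and 480 <= y < 551:
--         return -1
--     return 0
-- ===== Notes on version B (the rewrite author's own statement) =====
-- stated objective: simpler
-- what changed: B replaces building two materialised coordinate lists (range products) and scanning them by membership with direct range comparisons on x and y.
import Mathlib
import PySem

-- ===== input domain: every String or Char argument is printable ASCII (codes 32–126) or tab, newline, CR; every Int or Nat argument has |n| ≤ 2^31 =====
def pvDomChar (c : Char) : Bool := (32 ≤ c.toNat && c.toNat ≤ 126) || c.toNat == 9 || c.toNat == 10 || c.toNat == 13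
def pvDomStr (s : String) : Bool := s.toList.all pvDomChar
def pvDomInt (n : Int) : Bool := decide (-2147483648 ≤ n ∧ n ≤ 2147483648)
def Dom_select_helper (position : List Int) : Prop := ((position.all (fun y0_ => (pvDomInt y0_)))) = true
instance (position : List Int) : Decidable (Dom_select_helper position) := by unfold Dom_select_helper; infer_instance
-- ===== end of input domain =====

-- B replaces A's two materialised coordinate lists (built with range products and scanned by membership) with direct bound comparisons.

-- ===== PORT A =====
-- A builds the full list of coordinates of each rectangle, then tests membership.
def select_helper (position : List Int) : Int :=
  let against_player : List (Int × Int) :=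
    (PySem.List.pyRange 390 (390 + 71) 1).flatMap (fun i =>
      (PySem.List.pyRange 125 (125 + 371) 1).map (fun j => (j, i)))
  let against_ai : List (Int × Int) :=
    (PySem.List.pyRange 480 (480 + 71) 1).flatMap (fun i =>
      (PySem.List.pyRange 175 (175 + 286) 1).map (fun j => (j, i)))
  -- 'position in <list of 2-tuples>': a tuple of another arity is never a member
  match position with
  | [x, y] =>
    if (x, y) ∈ against_player then 1
    else if (x, y) ∈ against_ai then -1
    else 0
  | _ => 0

-- ===== PORT B =====
-- Source B checks len(position) == 2 and then unpacks x, y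
def select_helper_alt (position : List Int) : Int :=
  if position.length ≠ 2 then 0
  else
    let x := position.getD 0 0
    let y := position.getD 1 0
    if 125 ≤ x ∧ x < 496 ∧ 390 ≤ y ∧ y < 461 then 1
    else if 175 ≤ x ∧ x < 461 ∧ 480 ≤ y ∧ y < 551 then -1
    else 0

-- ===== PRECONDITION & SPEC =====
def Spec_select_helper (position : List Int) (out : Int) : Prop := out = select_helper_alt position
instance (position : List Int) (out : Int) : Decidable (Spec_select_helper position out) := by unfold Spec_select_helper; infer_instance

-- ===== CLAIM =====
def Claim_equal_select_helper : Prop := ∀ (position : List Int), Dom_select_helper position → Spec_select_helper position (select_helper position)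

-- ===== LEMMAS AND PROOFS =====
theorem mem_rect (x y a b c d : Int) :
    ((x, y) ∈ (PySem.List.pyRange c d 1).flatMap (fun i =>
      (PySem.List.pyRange a b 1).map (fun j => (j, i)))) ↔
    (a ≤ x ∧ x < b ∧ c ≤ y ∧ y < d) := by
  simp only [List.mem_flatMap, List.mem_map, PySem.List.mem_pyRange_one, Prod.mk.injEq]
  constructor
  · rintro ⟨i, hi, j, hj, hx, hy⟩
    subst hx; subst hy; exact ⟨hj.1, hj.2, hi.1, hi.2⟩
  · rintro ⟨h1, h2, h3, h4⟩
    exact ⟨y, ⟨h3, h4⟩, x, ⟨h1, h2⟩, rfl, rfl⟩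

-- ===== VERDICT =====
theorem select_helper_spec : Claim_equal_select_helper := by
  intro position _
  unfold Spec_select_helper select_helper select_helper_alt
  match position with
  | [] => rfl
  | [_] => rfl
  | x :: y :: _ :: _ => rfl
  | [x, y] =>
    simp only [mem_rect, List.length, List.getD]
    norm_num
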